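-- pv_equiv track=rewrite | github.com/brandonlemley90-sys/SubmittalBuilderApp | BoxesBuilder.py | expand_mfg_candidates
-- ===== SOURCE A (Python) =====
-- def normalize_for_match(s):
--     t = str(s).upper().strip()
--     for ch in ["'", "\u2018", "\u2019"]:
--         t = t.replace(ch, '')
--     for ch in ['.', ',', '\\', '-', '&', '_', '/']:
--         t = t.replace(ch, ' ')
--     while '  ' in t:
--         t = t.replace('  ', ' ')
--     return t.strip()
--
-- def expand_mfg_candidates(mfg_raw, tbl_aliases):
--     s = mfg_raw.replace('/', ',')
--     parts = [p.strip() for p in s.split(',') if p.strip()]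
--     seen = set()
--     out = []
--     for p in parts:
--         n = normalize_for_match(p)
--         if n and n not in seen:
--             seen.add(n)
--             out.append(n)
--
--             for alias_row in tbl_aliases:
--                 al = str(alias_row.get('Alias', '')).strip()
--                 can = str(alias_row.get('Canonical', '')).strip()
--
--                 norm_al = normalize_for_match(al)
--                 norm_can = normalize_for_match(can)
--
--                 if norm_al and norm_al == n and norm_can:
--                     if norm_can not in seen:
--                         seen.add(norm_can)
--                         out.append(norm_can)
--                 elif norm_can and norm_can == n and norm_al:
--                     if norm_al not in seen:
--                         seen.add(norm_al)
--                         out.append(norm_al)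
--
--     return out
-- ===== SOURCE B (Python) =====
-- def normalize_for_match(s):
--     t = str(s).upper().strip()
--     for ch in ["'", "\u2018", "\u2019"]:
--         t = t.replace(ch, '')
--     for ch in ['.', ',', '\\', '-', '&', '_', '/']:
--         t = t.replace(ch, ' ')
--     while '  ' in t:
--         t = t.replace('  ', ' ')
--     return t.strip()
--
-- def expand_mfg_candidates(mfg_raw, tbl_aliases):
--     # One pass over the alias table: index each normalized name to its ordered
--     # list of partner names, then a single lookup per part of mfg_raw.
--     index = {}
--     for alias_row in tbl_aliases:
--         norm_al = normalize_for_match(str(alias_row.get('Alias', '')).strip())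
--         norm_can = normalize_for_match(str(alias_row.get('Canonical', '')).strip())
--         if norm_al and norm_can:
--             index.setdefault(norm_al, []).append(norm_can)
--             if norm_al != norm_can:
--                 index.setdefault(norm_can, []).append(norm_al)
--     s = mfg_raw.replace('/', ',')
--     parts = [p.strip() for p in s.split(',') if p.strip()]
--     seen = set()
--     out = []
--     for p in parts:
--         n = normalize_for_match(p)
--         if n and n not in seen:
--             seen.add(n)
--             out.append(n)
--             for cand in index.get(n, []):
--                 if cand not in seen:
--                     seen.add(cand)
--                     out.append(cand)
--     return out
-- ===== Notes on version B (the rewrite author's own statement) =====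
-- stated objective: alternative
-- what changed: B builds a dict mapping each normalized alias-table name to its ordered list of partner names in one pass over the table and serves each part of mfg_raw by a single dict lookup, instead of A's rescan of the whole alias table per part; same measured cost on the benchmark family.
import Mathlib
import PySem

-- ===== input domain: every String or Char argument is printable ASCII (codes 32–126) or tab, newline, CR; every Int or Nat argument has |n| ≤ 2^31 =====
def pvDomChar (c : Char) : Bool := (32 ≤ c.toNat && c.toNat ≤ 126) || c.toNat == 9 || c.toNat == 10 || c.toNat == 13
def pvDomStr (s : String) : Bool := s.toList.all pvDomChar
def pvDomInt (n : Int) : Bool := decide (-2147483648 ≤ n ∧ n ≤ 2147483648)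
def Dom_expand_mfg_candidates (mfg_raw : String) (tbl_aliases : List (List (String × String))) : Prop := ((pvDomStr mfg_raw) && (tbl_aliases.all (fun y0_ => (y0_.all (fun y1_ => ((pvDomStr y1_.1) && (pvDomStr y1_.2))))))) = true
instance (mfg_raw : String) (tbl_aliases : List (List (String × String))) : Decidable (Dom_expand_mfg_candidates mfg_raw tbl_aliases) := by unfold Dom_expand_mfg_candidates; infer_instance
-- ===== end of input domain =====

-- B replaces A's per-part rescan of the whole alias table by a dict (normalized
-- name -> ordered partner list) built in one pass over the table, then one lookup per part.

-- ===== PORT A =====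
-- shared helper normalize_for_match (identical source text in Source A and Source B);
-- the Python 'while "  " in t' loop is ported by hand with fuel t.length + 1,
-- which suffices because each replace of "  " by " " shortens t.
def pvCollapse : Nat → List Char → List Char
  | 0, t => t
  | Nat.succ fuel, t =>
    if PySem.Chars.isIn [' ', ' '] t then pvCollapse fuel (PySem.Chars.replace t [' ', ' '] [' ']) else t

def normalize_for_match (s : String) : String :=
  let t0 := PySem.Chars.strip (PySem.Chars.upper s.toList)
  let t1 := ['\'', '‘', '’'].foldl (fun t ch => PySem.Chars.replace t [ch] []) t0
  let t2 := ['.', ',', '\\', '-', '&', '_', '/'].foldl (fun t ch => PySem.Chars.replace t [ch] [' ']) t1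
  let t3 := pvCollapse (t2.length + 1) t2
  String.ofList (PySem.Chars.strip t3)

-- normalize_for_match(str(alias_row.get(k, '')).strip())  (both Pythons compute this)
def pvNormField (row : List (String × String)) (k : String) : String :=
  normalize_for_match (String.ofList (PySem.Chars.strip (PySem.Dict.getD (PySem.Dict.mk row) k "").toList))

-- s = mfg_raw.replace('/', ','); parts = [p.strip() for p in s.split(',') if p.strip()]
def pvParts (mfg_raw : String) : List String :=
  ((PySem.Chars.splitOn (PySem.Chars.replace mfg_raw.toList ['/'] [',']) [',']).map
      (fun p => String.ofList (PySem.Chars.strip p))).filter (fun p => decide (p ≠ ""))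

-- body of A's inner 'for alias_row in tbl_aliases' loop
def pvInnerStepA (n : String) (st : PySem.Set String × List String) (row : List (String × String)) :
    PySem.Set String × List String :=
  let norm_al := pvNormField row "Alias"
  let norm_can := pvNormField row "Canonical"
  if norm_al ≠ "" ∧ norm_al = n ∧ norm_can ≠ "" then
    if norm_can ∉ st.1 then (PySem.Set.add st.1 norm_can, st.2 ++ [norm_can]) else st
  else if norm_can ≠ "" ∧ norm_can = n ∧ norm_al ≠ "" then
    if norm_al ∉ st.1 then (PySem.Set.add st.1 norm_al, st.2 ++ [norm_al]) else st
  else st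

-- body of A's outer 'for p in parts' loop
def pvOuterStepA (tbl_aliases : List (List (String × String)))
    (st : PySem.Set String × List String) (p : String) : PySem.Set String × List String :=
  let n := normalize_for_match p
  if n ≠ "" ∧ n ∉ st.1 then
    tbl_aliases.foldl (pvInnerStepA n) (PySem.Set.add st.1 n, st.2 ++ [n])
  else st

def expand_mfg_candidates (mfg_raw : String) (tbl_aliases : List (List (String × String))) : List String :=
  ((pvParts mfg_raw).foldl (pvOuterStepA tbl_aliases) (PySem.Set.empty, [])).2

-- ===== PORT B =====
-- body of B's index-building loop: index.setdefault(al, []).append(can), and the reverse entry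
def pvIdxStep (d : PySem.Dict String (List String)) (row : List (String × String)) :
    PySem.Dict String (List String) :=
  if pvNormField row "Alias" ≠ "" ∧ pvNormField row "Canonical" ≠ "" then
    let d1 := d.modify (pvNormField row "Alias") [] (fun l => l ++ [pvNormField row "Canonical"])
    if pvNormField row "Alias" ≠ pvNormField row "Canonical" then
      d1.modify (pvNormField row "Canonical") [] (fun l => l ++ [pvNormField row "Alias"])
    else d1
  else d

def pvIndex (tbl_aliases : List (List (String × String))) : PySem.Dict String (List String) :=
  tbl_aliases.foldl pvIdxStep PySem.Dict.empty

-- body of B's 'for cand in index.get(n, [])' loop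
def pvAdd (st : PySem.Set String × List String) (c : String) : PySem.Set String × List String :=
  if c ∉ st.1 then (PySem.Set.add st.1 c, st.2 ++ [c]) else st

-- body of B's 'for p in parts' loop
def pvOuterStepB (index : PySem.Dict String (List String))
    (st : PySem.Set String × List String) (p : String) : PySem.Set String × List String :=
  let n := normalize_for_match p
  if n ≠ "" ∧ n ∉ st.1 then
    (index.getD n []).foldl pvAdd (PySem.Set.add st.1 n, st.2 ++ [n])
  else st

def expand_mfg_candidates_alt (mfg_raw : String) (tbl_aliases : List (List (String × String))) : List String :=
  let index := pvIndex tbl_aliases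
  ((pvParts mfg_raw).foldl (pvOuterStepB index) (PySem.Set.empty, [])).2

-- ===== PRECONDITION & SPEC =====
def Spec_expand_mfg_candidates (mfg_raw : String) (tbl_aliases : List (List (String × String))) (out : List String) : Prop := out = expand_mfg_candidates_alt mfg_raw tbl_aliases
instance (mfg_raw : String) (tbl_aliases : List (List (String × String))) (out : List String) : Decidable (Spec_expand_mfg_candidates mfg_raw tbl_aliases out) := by unfold Spec_expand_mfg_candidates; infer_instance

-- ===== CLAIM (what is proved, stated in full; the proofs are below) =====
def Claim_equal_expand_mfg_candidates : Prop := ∀ (mfg_raw : String) (tbl_aliases : List (List (String × String))), Dom_expand_mfg_candidates mfg_raw tbl_aliases → Spec_expand_mfg_candidates mfg_raw tbl_aliases (expand_mfg_candidates mfg_raw tbl_aliases)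

-- ===== LEMMAS AND PROOFS =====

-- the candidate A's inner scan appends for part n at one alias row (at most one per row)
def pvRowCand (n : String) (row : List (String × String)) : Option String :=
  if pvNormField row "Alias" ≠ "" ∧ pvNormField row "Alias" = n ∧ pvNormField row "Canonical" ≠ "" then
    some (pvNormField row "Canonical")
  else if pvNormField row "Canonical" ≠ "" ∧ pvNormField row "Canonical" = n ∧ pvNormField row "Alias" ≠ "" then
    some (pvNormField row "Alias")
  else none

-- one index step adds exactly the row's candidate for n to the bucket of a nonempty n
lemma pvIdxStep_getD (n : String) (_hn : n ≠ "") (d : PySem.Dict String (List String))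
    (row : List (String × String)) :
    (pvIdxStep d row).getD n [] = d.getD n [] ++ (pvRowCand n row).toList := by
  unfold pvIdxStep pvRowCand
  by_cases ha0 : pvNormField row "Alias" = ""
  · simp [ha0]
  · by_cases hc0 : pvNormField row "Canonical" = ""
    · simp [hc0, ha0]
    · simp only [ne_eq, ha0, not_false_eq_true, hc0, and_self, and_true, if_true, true_and]
      by_cases hac : pvNormField row "Alias" = pvNormField row "Canonical"
      · rw [← hac]
        simp only [not_true_eq_false, if_false]
        rw [PySem.Dict.getD_modify]
        by_cases han : pvNormField row "Alias" = n
        · simp [han]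
        · have han' : ¬ n = pvNormField row "Alias" := fun h => han h.symm
          simp [han, han']
      · simp only [hac, not_false_eq_true, if_true]
        rw [PySem.Dict.getD_modify, PySem.Dict.getD_modify]
        by_cases han : pvNormField row "Alias" = n
        · have hcn : ¬ pvNormField row "Canonical" = n := fun h => hac (han.trans h.symm)
          have hcn' : ¬ n = pvNormField row "Canonical" := fun h => hcn h.symm
          simp [han, hcn']
        · have han' : ¬ n = pvNormField row "Alias" := fun h => han h.symm
          by_cases hcn : pvNormField row "Canonical" = n
          · simp [hcn, han, han']
          · have hcn' : ¬ n = pvNormField row "Canonical" := fun h => hcn h.symm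
            simp [PySem.Dict.getD_modify, han, hcn, han', hcn']

-- B's index, looked up at a nonempty n, lists A's per-row candidates in row order
lemma pvIndex_getD (n : String) (hn : n ≠ "") :
    ∀ (rows : List (List (String × String))) (d : PySem.Dict String (List String)),
      (rows.foldl pvIdxStep d).getD n [] = d.getD n [] ++ rows.filterMap (pvRowCand n) := by
  intro rows
  induction rows with
  | nil => intro d; simp
  | cons row rest ih =>
    intro d
    simp only [List.foldl_cons, List.filterMap_cons, ih, pvIdxStep_getD n hn]
    cases pvRowCand n row <;> simp

-- A's inner step is pvAdd driven by the row's candidate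
lemma pvInnerStepA_eq (n : String) (st : PySem.Set String × List String)
    (row : List (String × String)) :
    pvInnerStepA n st row = match pvRowCand n row with
      | some c => pvAdd st c
      | none => st := by
  unfold pvInnerStepA pvRowCand
  by_cases h1 : pvNormField row "Alias" ≠ "" ∧ pvNormField row "Alias" = n ∧ pvNormField row "Canonical" ≠ ""
  · rw [if_pos h1, if_pos h1]; rfl
  · rw [if_neg h1, if_neg h1]
    by_cases h2 : pvNormField row "Canonical" ≠ "" ∧ pvNormField row "Canonical" = n ∧ pvNormField row "Alias" ≠ ""
    · rw [if_pos h2, if_pos h2]; rfl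
    · rw [if_neg h2, if_neg h2]

-- A's inner scan over the table = B's walk over the bucket
lemma innerA_eq_bucket (n : String) :
    ∀ (rows : List (List (String × String))) (st : PySem.Set String × List String),
      rows.foldl (pvInnerStepA n) st = (rows.filterMap (pvRowCand n)).foldl pvAdd st := by
  intro rows
  induction rows with
  | nil => intro st; rfl
  | cons row rest ih =>
    intro st
    rw [List.foldl_cons, List.filterMap_cons, pvInnerStepA_eq]
    cases h : pvRowCand n row <;> simp [ih]

-- the two per-part steps agree
lemma outerStep_eq (tbl_aliases : List (List (String × String)))
    (st : PySem.Set String × List String) (p : String) :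
    pvOuterStepA tbl_aliases st p = pvOuterStepB (pvIndex tbl_aliases) st p := by
  unfold pvOuterStepA pvOuterStepB
  by_cases h : normalize_for_match p ≠ "" ∧ normalize_for_match p ∉ st.1
  · simp only [h]
    rw [innerA_eq_bucket, pvIndex, pvIndex_getD _ h.1]
    simp [PySem.Dict.empty, PySem.Dict.getD, PySem.Dict.get?]
  · simp [h]

theorem expand_mfg_candidates_spec : Claim_equal_expand_mfg_candidates := by
  intro mfg_raw tbl_aliases _
  unfold Spec_expand_mfg_candidates expand_mfg_candidates expand_mfg_candidates_alt
  have h : pvOuterStepA tbl_aliases = pvOuterStepB (pvIndex tbl_aliases) := by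
    funext st p; exact outerStep_eq tbl_aliases st p
  rw [h]
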